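-- pv_equiv track=rewrite | github.com/Solidxinnia/LLMReconstruction | get_source_code.py | _with_line_numbers
-- ===== SOURCE A (Python) =====
-- def _with_line_numbers(code: str) -> str:
--     """Prefix code with 1-based line numbers for reliable coverage mapping.
--
--     CRITICAL: Strip leading/trailing blank lines from callgraph JSON to prevent line drift.
--     The callgraph JSON method bodies often have extra whitespace that causes misalignment
--     with ground truth line numbers.
--     """
--     if not code:
--         return code
--
--     # Strip leading and trailing blank lines to match ground truth numbering
--     lines = code.splitlines()
--
--     # Find first non-blank line
--     start_idx = 0
--     for i, line in enumerate(lines):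
--         if line.strip():
--             start_idx = i
--             break
--
--     # Find last non-blank line
--     end_idx = len(lines) - 1
--     for i in range(len(lines) - 1, -1, -1):
--         if lines[i].strip():
--             end_idx = i
--             break
--
--     # Extract non-blank range
--     lines = lines[start_idx:end_idx + 1]
--
--     width = max(2, len(str(max(0, len(lines) - 1))))
--     return "\n".join(f"{i:>{width}}: {line}" for i, line in enumerate(lines, start=0))
-- ===== SOURCE B (Python) =====
-- def _with_line_numbers(code: str) -> str:
--     """Prefix code with line numbers; trim blank edges via one buffered pass."""
--     if not code:
--         return code
--     kept, pending = [], []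
--     for line in code.splitlines():
--         if line.strip():
--             kept.extend(pending)
--             pending = []
--             kept.append(line)
--         elif kept:
--             pending.append(line)
--     width = max(2, len(str(max(0, len(kept) - 1))))
--     return "\n".join(f"{i:>{width}}: {line}" for i, line in enumerate(kept))
-- ===== Notes on version B (the rewrite author's own statement) =====
-- stated objective: alternative
-- what changed: Replaces A's two directional boundary scans plus slice by a single forward pass with a pending-buffer accumulator: blank lines are buffered and flushed into the output only when a later non-blank line appears, so leading and trailing blanks are never emitted and no indices or slicing are computed.
-- intended difference: On nonempty code whose lines are all blank, A keeps and numbers every blank line (e.g. ' 0: ' for a single space) while B returns the empty string because trimming the blank edges leaves nothing, which is the intended result of a function documented as stripping leading/trailing blank lines. — e.g. on _with_line_numbers(" "): A returns " 0: ", B returns ""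
import Mathlib
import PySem

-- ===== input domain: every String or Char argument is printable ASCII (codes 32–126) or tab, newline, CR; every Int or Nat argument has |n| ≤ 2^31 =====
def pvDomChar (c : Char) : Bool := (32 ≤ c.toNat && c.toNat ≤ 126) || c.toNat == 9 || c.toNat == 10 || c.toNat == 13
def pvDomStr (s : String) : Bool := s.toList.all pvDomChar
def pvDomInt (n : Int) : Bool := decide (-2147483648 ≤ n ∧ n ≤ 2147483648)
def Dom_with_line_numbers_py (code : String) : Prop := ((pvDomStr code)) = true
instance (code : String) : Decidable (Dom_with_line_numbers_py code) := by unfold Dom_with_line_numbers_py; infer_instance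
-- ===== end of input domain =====

-- B replaces A's two directional boundary scans + slice by a single buffered forward pass
-- (blank lines are buffered and flushed only when a later non-blank line appears), objective: alternative.

-- ===== PORT A =====
-- f"{i:>{width}}: {line}"  — right-align str(i) in `width` spaces; exact for the ASCII decimal numeral
def pvFmt (width : Nat) (i : Int) (line : String) : String :=
  let s := PySem.Int.toStr i
  PySem.Str.join "" [String.ofList (List.replicate (width - s.toList.length) ' '), s, ": ", line]

-- 'start_idx = 0; for i, line in enumerate(lines): if line.strip(): start_idx = i; break'
def pvScanFwd : List String → Int → Int
  | [], _ => 0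
  | l :: rest, i => if PySem.Str.strip l != "" then i else pvScanFwd rest (i + 1)

-- 'for i in range(len(lines)-1, -1, -1): if lines[i].strip(): end_idx = i; break'  (d = default end_idx)
def pvScanBwd (lines : List String) : List Int → Int → Int
  | [], d => d
  | i :: rest, d =>
    if PySem.Str.strip (PySem.List.pyGetD lines i "") != "" then i
    else pvScanBwd lines rest d

def with_line_numbers_py (code : String) : String :=
  if code = "" then code
  else
    let lines := PySem.Str.splitlines code
    let start_idx := pvScanFwd lines 0
    let end_idx := pvScanBwd lines
      (PySem.List.pyRange ((lines.length : Int) - 1) (-1) (-1)) ((lines.length : Int) - 1)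
    let lines2 := PySem.List.slice lines (some start_idx) (some (end_idx + 1))
    let width := max 2 (PySem.Int.toStr (max 0 ((lines2.length : Int) - 1))).toList.length
    PySem.Str.join "\n" ((PySem.List.enumerate lines2 0).map (fun p => pvFmt width p.1 p.2))

-- ===== PORT B =====
-- one step of B's loop over the state (kept, pending)
def pvStep (st : List String × List String) (line : String) : List String × List String :=
  if PySem.Str.strip line != "" then (st.1 ++ st.2 ++ [line], [])
  else if st.1 != [] then (st.1, st.2 ++ [line])
  else st

def with_line_numbers_py_alt (code : String) : String :=
  if code = "" then code
  else
    let kept := ((PySem.Str.splitlines code).foldl pvStep ([], [])).1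
    let width := max 2 (PySem.Int.toStr (max 0 ((kept.length : Int) - 1))).toList.length
    PySem.Str.join "\n" ((PySem.List.enumerate kept 0).map (fun p => pvFmt width p.1 p.2))

-- ===== PRECONDITION & SPEC =====
-- On nonempty code whose lines are all blank, A keeps and numbers every blank line, while B
-- returns the empty string because trimming the blank edges leaves nothing — the intended result of a
-- function documented as stripping leading/trailing blank lines.
def D_with_line_numbers_py (code : String) : Prop :=
  code ≠ "" ∧ PySem.Str.splitlines code ≠ [] ∧
    ∀ l ∈ PySem.Str.splitlines code, PySem.Str.strip l = ""
instance (code : String) : Decidable (D_with_line_numbers_py code) := by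
  unfold D_with_line_numbers_py; infer_instance

def Spec_with_line_numbers_py (code : String) (out : String) : Prop :=
  ¬ D_with_line_numbers_py code → out = with_line_numbers_py_alt code
instance (code : String) (out : String) : Decidable (Spec_with_line_numbers_py code out) := by
  unfold Spec_with_line_numbers_py; infer_instance

def pvDiffWitness_with_line_numbers_py : String := " "
def pvDiffWitnessOut_with_line_numbers_py : String × String := (" 0:  ", "")

-- ===== CLAIM (what is proved, stated in full; the proofs are below) =====
def Claim_unchanged_with_line_numbers_py : Prop := ∀ (code : String), Dom_with_line_numbers_py code → Spec_with_line_numbers_py code (with_line_numbers_py code)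
def Claim_changed_with_line_numbers_py : Prop := Dom_with_line_numbers_py (pvDiffWitness_with_line_numbers_py) ∧ D_with_line_numbers_py (pvDiffWitness_with_line_numbers_py) ∧ with_line_numbers_py (pvDiffWitness_with_line_numbers_py) = pvDiffWitnessOut_with_line_numbers_py.1 ∧ with_line_numbers_py_alt (pvDiffWitness_with_line_numbers_py) = pvDiffWitnessOut_with_line_numbers_py.2 ∧ pvDiffWitnessOut_with_line_numbers_py.1 ≠ pvDiffWitnessOut_with_line_numbers_py.2
def Claim_exact_with_line_numbers_py : Prop := ∀ (code : String), Dom_with_line_numbers_py code → D_with_line_numbers_py code → with_line_numbers_py code ≠ with_line_numbers_py_alt code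

-- ===== LEMMAS AND PROOFS =====

-- a line is blank iff it strips to ""
def pvBlank (l : String) : Bool := PySem.Str.strip l == ""

-- trailing-blank trim, used only in the proofs
def pvTrimR (ls : List String) : List String := (ls.reverse.dropWhile pvBlank).reverse

theorem pv_dropWhile_eq_drop {α : Type} (p : α → Bool) (l : List α) :
    l.dropWhile p = l.drop (l.takeWhile p).length := by
  induction l with
  | nil => rfl
  | cons x rest ih =>
    by_cases h : p x
    · simp [h, ih]
    · simp [h]

theorem pv_takeWhile_take {α : Type} (p : α → Bool) (l : List α) (j : Nat)
    (hj : (l.takeWhile p).length ≤ j) : (l.take j).takeWhile p = l.takeWhile p := by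
  induction l generalizing j with
  | nil => simp
  | cons x rest ih =>
    cases j with
    | zero =>
      by_cases h : p x
      · simp [h] at hj
      · simp [h]
    | succ k =>
      by_cases h : p x
      · simp only [List.takeWhile_cons, h, if_true, List.length_cons, Nat.add_le_add_iff_right] at hj ⊢
        simp [List.take_succ_cons, h, ih k hj]
      · simp [List.take_succ_cons, h]

theorem pvBlank_strip (l : String) (h : pvBlank l = true) : PySem.Str.strip l = "" := by
  simpa [pvBlank] using h

theorem pvBlank_strip_ne (l : String) (h : ¬ pvBlank l = true) : PySem.Str.strip l ≠ "" := by
  simpa [pvBlank] using h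

theorem pv_tw_blank (l : List String) (i : Nat) (hi : i < (l.takeWhile pvBlank).length) :
    pvBlank (l.getD i "") = true := by
  have hpre := List.takeWhile_prefix (l := l) pvBlank
  have hlen : i < l.length := Nat.lt_of_lt_of_le hi hpre.length_le
  have hget : (l.takeWhile pvBlank)[i] = l[i] := List.IsPrefix.getElem hpre hi
  have hmem : (l.takeWhile pvBlank)[i] ∈ l.takeWhile pvBlank := List.getElem_mem _
  have := List.mem_takeWhile_imp hmem
  rw [List.getD_eq_getElem l "" hlen, ← hget]
  exact this

theorem pv_s0_nonblank (l : List String) (h : ∃ x ∈ l, pvBlank x = false) :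
    pvBlank (l.getD (l.takeWhile pvBlank).length "") = false := by
  induction l with
  | nil => simp at h
  | cons x rest ih =>
    by_cases hx : pvBlank x
    · have hr : ∃ y ∈ rest, pvBlank y = false := by
        obtain ⟨y, hy, hyb⟩ := h
        rcases List.mem_cons.mp hy with rfl | hy'
        · rw [hx] at hyb; cases hyb
        · exact ⟨y, hy', hyb⟩
      rw [List.takeWhile_cons_of_pos hx]
      simp only [List.length_cons, List.getD_cons_succ]
      exact ih hr
    · rw [List.takeWhile_cons_of_neg hx]
      simp only [List.length_nil, List.getD_cons_zero]
      exact Bool.eq_false_iff.mpr hx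

theorem pv_tw_len_lt (l : List String) (h : ∃ x ∈ l, pvBlank x = false) :
    (l.takeWhile pvBlank).length < l.length := by
  induction l with
  | nil => simp at h
  | cons x rest ih =>
    by_cases hx : pvBlank x
    · have hr : ∃ y ∈ rest, pvBlank y = false := by
        obtain ⟨y, hy, hyb⟩ := h
        rcases List.mem_cons.mp hy with rfl | hy'
        · rw [hx] at hyb; cases hyb
        · exact ⟨y, hy', hyb⟩
      simpa [List.takeWhile_cons, hx] using ih hr
    · simp [hx]

-- first non-blank index + trailing blank count < length
theorem pv_s0_k0_lt (l : List String) (h : ∃ x ∈ l, pvBlank x = false) :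
    (l.takeWhile pvBlank).length + (l.reverse.takeWhile pvBlank).length < l.length := by
  set s0 := (l.takeWhile pvBlank).length with hs0
  set k0 := (l.reverse.takeWhile pvBlank).length with hk0
  have hs0lt : s0 < l.length := pv_tw_len_lt l h
  by_contra hcon
  push Not at hcon
  have hi : l.length - 1 - s0 < k0 := by omega
  have hb := pv_tw_blank l.reverse (l.length - 1 - s0) (by simpa [hk0] using hi)
  have hrevlen : l.length - 1 - s0 < l.reverse.length := by simp; omega
  rw [List.getD_eq_getElem l.reverse "" hrevlen] at hb
  have hgr : l.reverse[l.length - 1 - s0]'hrevlen = l[s0]'hs0lt := by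
    rw [List.getElem_reverse]
    congr 1
    omega
  rw [hgr] at hb
  have hnb := pv_s0_nonblank l h
  rw [List.getD_eq_getElem l "" hs0lt] at hnb
  rw [hb] at hnb; cases hnb

-- === B-side: the fold computes "drop leading blanks, then drop trailing blanks" ===

theorem pv_trimR_append_nonblank (p rest : List String) (x : String) (hx : pvBlank x = false) :
    pvTrimR (p ++ x :: rest) = p ++ x :: pvTrimR rest := by
  unfold pvTrimR
  have hrev : (p ++ x :: rest).reverse = rest.reverse ++ x :: p.reverse := by simp
  rw [hrev, List.dropWhile_append]
  by_cases hr : rest.reverse.dropWhile pvBlank = []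
  · rw [if_pos (by simp [hr])]
    rw [List.dropWhile_cons_of_neg (by simp [hx])]
    simp [hr]
  · rw [if_neg (by simpa [List.isEmpty_iff] using hr)]
    simp

theorem pv_trimR_all_blank (p : List String) (hp : ∀ l ∈ p, pvBlank l = true) :
    pvTrimR p = [] := by
  unfold pvTrimR
  rw [List.dropWhile_eq_nil_iff.mpr (by intro x hx; exact hp x (List.mem_reverse.mp hx))]
  rfl

theorem pv_fold_ne (ls : List String) : ∀ (k p : List String), k ≠ [] →
    (∀ l ∈ p, pvBlank l = true) → (ls.foldl pvStep (k, p)).1 = k ++ pvTrimR (p ++ ls) := by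
  induction ls with
  | nil =>
    intro k p hk hp
    simp [pv_trimR_all_blank p hp]
  | cons x rest ih =>
    intro k p hk hp
    by_cases hx : pvBlank x
    · have hxeq : PySem.Str.strip x = "" := pvBlank_strip x hx
      have hstep : pvStep (k, p) x = (k, p ++ [x]) := by
        simp [pvStep, hxeq, bne_iff_ne, hk]
      rw [List.foldl_cons, hstep, ih k (p ++ [x]) hk
        (by intro l hl; rcases List.mem_append.mp hl with h | h;
            · exact hp l h
            · simp at h; subst h; exact hx)]
      simp
    · have hxne : PySem.Str.strip x ≠ "" := pvBlank_strip_ne x hx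
      have hstep : pvStep (k, p) x = (k ++ p ++ [x], []) := by
        simp [pvStep, bne_iff_ne, hxne]
      rw [List.foldl_cons, hstep, ih (k ++ p ++ [x]) [] (by simp) (by simp)]
      rw [pv_trimR_append_nonblank p rest x (Bool.eq_false_iff.mpr hx)]
      simp

theorem pv_fold_nil (ls : List String) :
    (ls.foldl pvStep ([], [])).1 = pvTrimR (ls.dropWhile pvBlank) := by
  induction ls with
  | nil => simp [pvTrimR]
  | cons x rest ih =>
    by_cases hx : pvBlank x
    · have hxeq : PySem.Str.strip x = "" := pvBlank_strip x hx
      have hstep : pvStep ([], []) x = ([], []) := by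
        simp [pvStep, hxeq]
      rw [List.foldl_cons, hstep, ih, List.dropWhile_cons_of_pos hx]
    · have hxne : PySem.Str.strip x ≠ "" := pvBlank_strip_ne x hx
      have hstep : pvStep ([], []) x = ([x], []) := by
        simp [pvStep, bne_iff_ne, hxne]
      rw [List.foldl_cons, hstep,
        pv_fold_ne rest [x] [] (by simp) (by simp),
        List.dropWhile_cons_of_neg hx]
      have := pv_trimR_append_nonblank [] rest x (Bool.eq_false_iff.mpr hx)
      simpa using this.symm

-- === A-side: the two scans compute the takeWhile lengths ===

theorem pv_scanFwd_val (ls : List String) (h : ∃ x ∈ ls, pvBlank x = false) :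
    ∀ i : Int, pvScanFwd ls i = i + ((ls.takeWhile pvBlank).length : Int) := by
  induction ls with
  | nil => simp at h
  | cons x rest ih =>
    intro i
    by_cases hx : pvBlank x
    · have hxeq : PySem.Str.strip x = "" := pvBlank_strip x hx
      have hr : ∃ y ∈ rest, pvBlank y = false := by
        obtain ⟨y, hy, hyb⟩ := h
        rcases List.mem_cons.mp hy with rfl | hy'
        · rw [hx] at hyb; cases hyb
        · exact ⟨y, hy', hyb⟩
      rw [show pvScanFwd (x :: rest) i = pvScanFwd rest (i + 1) from by
        simp [pvScanFwd, hxeq], ih hr (i + 1), List.takeWhile_cons_of_pos hx]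
      simp only [List.length_cons]
      push_cast; ring
    · have hxne : PySem.Str.strip x ≠ "" := pvBlank_strip_ne x hx
      rw [show pvScanFwd (x :: rest) i = i from by simp [pvScanFwd, bne_iff_ne, hxne],
        List.takeWhile_cons_of_neg hx]
      simp

theorem pv_scanBwd_congr (ls ls' : List String) (js : List Int) (d : Int)
    (h : ∀ j ∈ js, PySem.List.pyGetD ls j "" = PySem.List.pyGetD ls' j "") :
    pvScanBwd ls js d = pvScanBwd ls' js d := by
  induction js with
  | nil => rfl
  | cons j rest ih =>
    simp only [pvScanBwd, h j (by simp)]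
    rw [ih (fun j hj => h j (by simp [hj]))]

theorem pv_scanBwd_val (ls : List String) (h : ∃ x ∈ ls, pvBlank x = false) (d : Int) :
    pvScanBwd ls (PySem.List.pyRange ((ls.length : Int) - 1) (-1) (-1)) d
      = (ls.length : Int) - 1 - ((ls.reverse.takeWhile pvBlank).length : Int) := by
  induction ls using List.reverseRecOn with
  | nil => simp at h
  | append_singleton as a ih =>
    have hlen : ((as ++ [a]).length : Int) - 1 = (as.length : Int) := by simp
    rw [hlen, PySem.List.pyRange_neg_one_cons (by omega)]
    have hget : PySem.List.pyGetD (as ++ [a]) ((as.length : Int)) "" = a := by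
      rw [show ((as.length : Int)) = ((as.length : Nat) : Int) from rfl,
        PySem.List.pyGetD_natCast]
      simp
    by_cases ha : pvBlank a
    · have haeq : PySem.Str.strip a = "" := pvBlank_strip a ha
      rw [show pvScanBwd (as ++ [a])
            ((as.length : Int) :: PySem.List.pyRange ((as.length : Int) - 1) (-1) (-1)) d
          = pvScanBwd (as ++ [a]) (PySem.List.pyRange ((as.length : Int) - 1) (-1) (-1)) d from by
        simp [pvScanBwd, hget, haeq]]
      have hcongr : pvScanBwd (as ++ [a]) (PySem.List.pyRange ((as.length : Int) - 1) (-1) (-1)) d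
          = pvScanBwd as (PySem.List.pyRange ((as.length : Int) - 1) (-1) (-1)) d := by
        apply pv_scanBwd_congr
        intro j hj
        have hj' := (PySem.List.mem_pyRange_neg_one.mp hj)
        obtain ⟨hj1, hj2⟩ := hj'
        have hjn : ∃ m : Nat, (j : Int) = (m : Int) ∧ m < as.length := by
          refine ⟨j.toNat, ?_, ?_⟩ <;> omega
        obtain ⟨m, rfl, hm⟩ := hjn
        rw [PySem.List.pyGetD_natCast, PySem.List.pyGetD_natCast]
        rw [List.getD_eq_getElem _ _ (by simp; omega), List.getD_eq_getElem _ _ hm]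
        rw [List.getElem_append_left hm]
      have hr : ∃ y ∈ as, pvBlank y = false := by
        obtain ⟨y, hy, hyb⟩ := h
        rcases List.mem_append.mp hy with hy' | hy'
        · exact ⟨y, hy', hyb⟩
        · simp at hy'; subst hy'; rw [ha] at hyb; cases hyb
      rw [hcongr, ih hr]
      have htw : (as ++ [a]).reverse.takeWhile pvBlank
          = a :: (as.reverse.takeWhile pvBlank) := by
        rw [List.reverse_append]
        simp [ha]
      rw [htw]
      simp only [List.length_cons]
      push_cast; ring
    · have hane : PySem.Str.strip a ≠ "" := pvBlank_strip_ne a ha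
      rw [show pvScanBwd (as ++ [a])
            ((as.length : Int) :: PySem.List.pyRange ((as.length : Int) - 1) (-1) (-1)) d
          = (as.length : Int) from by simp [pvScanBwd, hget, bne_iff_ne, hane]]
      have htw : (as ++ [a]).reverse.takeWhile pvBlank = [] := by
        rw [List.reverse_append]
        simp [ha]
      rw [htw]
      simp

-- === assembling: A's slice equals B's trim ===

theorem pv_trim_eq (ls : List String) (h : ∃ x ∈ ls, pvBlank x = false) :
    pvTrimR (ls.dropWhile pvBlank)
      = (ls.drop (ls.takeWhile pvBlank).length).take
          (ls.length - (ls.reverse.takeWhile pvBlank).length - (ls.takeWhile pvBlank).length) := by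
  set s0 := (ls.takeWhile pvBlank).length with hs0
  set k0 := (ls.reverse.takeWhile pvBlank).length with hk0
  have hlt := pv_s0_k0_lt ls h
  rw [pv_dropWhile_eq_drop]
  set m := ls.drop s0 with hm
  have hmlen : m.length = ls.length - s0 := by simp [hm]
  have hmrev : m.reverse = ls.reverse.take (ls.length - s0) := List.reverse_drop
  have htw : m.reverse.takeWhile pvBlank = ls.reverse.takeWhile pvBlank := by
    rw [hmrev]
    exact pv_takeWhile_take pvBlank ls.reverse (ls.length - s0) (by rw [← hk0]; omega)
  unfold pvTrimR
  rw [pv_dropWhile_eq_drop, htw, ← hk0]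
  have h2 : (m.reverse.drop k0).reverse = m.take (m.length - k0) := by
    rw [List.reverse_drop]
    simp
  rw [h2, hmlen]
  congr 1
  omega

-- === tightness: inside D_ the two outputs always differ ===

theorem pv_scanFwd_allblank (ls : List String) (h : ∀ l ∈ ls, PySem.Str.strip l = "") :
    ∀ i : Int, pvScanFwd ls i = 0 := by
  induction ls with
  | nil => intro i; rfl
  | cons x rest ih =>
    intro i
    rw [show pvScanFwd (x :: rest) i = pvScanFwd rest (i + 1) from by
      simp [pvScanFwd, h x (by simp)]]
    exact ih (fun l hl => h l (by simp [hl])) (i + 1)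

theorem pv_scanBwd_allblank (ls : List String) (js : List Int) (d : Int)
    (h : ∀ l ∈ ls, PySem.Str.strip l = "")
    (hjs : ∀ j ∈ js, 0 ≤ j ∧ j < (ls.length : Int)) : pvScanBwd ls js d = d := by
  induction js with
  | nil => rfl
  | cons j rest ih =>
    obtain ⟨hj0, hj1⟩ := hjs j (by simp)
    have hb : PySem.Str.strip (PySem.List.pyGetD ls j "") = "" := by
      rw [PySem.List.pyGetD_eq_getElem ls "" hj0 hj1]
      exact h _ (List.getElem_mem _)
    rw [show pvScanBwd ls (j :: rest) d = pvScanBwd ls rest d from by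
      simp [pvScanBwd, hb]]
    exact ih (fun j hj => hjs j (by simp [hj]))

theorem pv_join_fmt_ne (w : Nat) (x : String) (r : List String) :
    PySem.Str.join "\n" (pvFmt w 0 x :: r) ≠ "" := by
  intro h
  have h2 : (PySem.Str.join "\n" (pvFmt w 0 x :: r)).toList = [] := by rw [h]; rfl
  rw [PySem.Str.toList_join] at h2
  cases r with
  | nil =>
    rw [List.map_cons, List.map_nil, PySem.Chars.join_singleton] at h2
    revert h2
    simp [pvFmt, PySem.Str.toList_join, PySem.Chars.join_cons_cons,
      PySem.Chars.join_singleton, show PySem.Int.toChars 0 = ['0'] from rfl]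
  | cons b t =>
    rw [List.map_cons, List.map_cons, PySem.Chars.join_cons_cons] at h2
    simp only [List.append_eq_nil_iff] at h2
    obtain ⟨⟨h3, -⟩, -⟩ := h2
    revert h3
    simp [pvFmt, PySem.Str.toList_join, PySem.Chars.join_cons_cons,
      PySem.Chars.join_singleton, show PySem.Int.toChars 0 = ['0'] from rfl]

-- ===== VERDICT (by name: the statement is the Claim_ definition above) =====
theorem with_line_numbers_py_spec : Claim_unchanged_with_line_numbers_py := by
  intro code _ hnd
  by_cases hc : code = ""
  · subst hc; rfl
  · by_cases hnil : PySem.Str.splitlines code = []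
    · simp only [with_line_numbers_py, with_line_numbers_py_alt, if_neg hc, hnil]
      rfl
    · have hex : ∃ x ∈ PySem.Str.splitlines code, pvBlank x = false := by
        by_contra hno
        push Not at hno
        exact hnd ⟨hc, hnil, fun l hl =>
          pvBlank_strip l (by
            have := hno l hl
            cases hb : pvBlank l
            · exact absurd hb this
            · rfl)⟩
      have hk0n : ((PySem.Str.splitlines code).reverse.takeWhile pvBlank).length
          ≤ (PySem.Str.splitlines code).length := by
        have := (List.takeWhile_prefix (l := (PySem.Str.splitlines code).reverse) pvBlank).length_le
        simpa using this
      simp only [with_line_numbers_py, with_line_numbers_py_alt, if_neg hc]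
      rw [pv_fold_nil, pv_trim_eq _ hex, pv_scanFwd_val _ hex 0, pv_scanBwd_val _ hex,
        zero_add]
      rw [show ((PySem.Str.splitlines code).length : Int) - 1
            - (((PySem.Str.splitlines code).reverse.takeWhile pvBlank).length : Int) + 1
          = (((PySem.Str.splitlines code).length
              - ((PySem.Str.splitlines code).reverse.takeWhile pvBlank).length : Nat) : Int) from by
        omega]
      rw [PySem.List.slice_natCast]

theorem with_line_numbers_py_changed : Claim_changed_with_line_numbers_py := by
  unfold Claim_changed_with_line_numbers_py; decide

theorem with_line_numbers_py_tight : Claim_exact_with_line_numbers_py := by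
  intro code _ hd
  obtain ⟨hc, hnil, hall⟩ := hd
  have hB : with_line_numbers_py_alt code = "" := by
    simp only [with_line_numbers_py_alt, if_neg hc]
    rw [pv_fold_nil,
      List.dropWhile_eq_nil_iff.mpr (fun x hx => by simp [pvBlank, hall x hx])]
    rfl
  rw [hB]
  obtain ⟨x, xs, hxs⟩ : ∃ x xs, PySem.Str.splitlines code = x :: xs := by
    cases h : PySem.Str.splitlines code with
    | nil => exact absurd h hnil
    | cons x xs => exact ⟨x, xs, rfl⟩
  simp only [with_line_numbers_py, if_neg hc]
  rw [pv_scanFwd_allblank _ hall 0,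
    pv_scanBwd_allblank _ _ _ hall (by
      intro j hj
      have := PySem.List.mem_pyRange_neg_one.mp hj
      omega)]
  rw [show ((PySem.Str.splitlines code).length : Int) - 1 + 1
      = (((PySem.Str.splitlines code).length : Nat) : Int) from by omega]
  rw [show (0 : Int) = ((0 : Nat) : Int) from rfl, PySem.List.slice_natCast]
  simp only [List.drop_zero, Nat.sub_zero, List.take_length]
  rw [hxs, PySem.List.enumerate_cons, List.map_cons]
  exact pv_join_fmt_ne _ x _
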